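-- pv_equiv track=rewrite | github.com/8n8/trumat | rules.py | insert_space_after_comma
-- ===== SOURCE A (Python) =====
-- def insert_space_after_comma(old):
--     new = ""
--     for c in old:
--         if c == ",":
--             new += ", "
--             continue
--
--         new += c
--
--     return new, None
-- ===== SOURCE B (Python) =====
-- def insert_space_after_comma(old):
--     return ", ".join(old.split(",")), None
-- ===== Notes on version B (the rewrite author's own statement) =====
-- stated objective: faster
-- what changed: Replaces the per-character loop with quadratic string concatenation by a single split on the comma separator followed by a join with the two-character separator.
import Mathlib
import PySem

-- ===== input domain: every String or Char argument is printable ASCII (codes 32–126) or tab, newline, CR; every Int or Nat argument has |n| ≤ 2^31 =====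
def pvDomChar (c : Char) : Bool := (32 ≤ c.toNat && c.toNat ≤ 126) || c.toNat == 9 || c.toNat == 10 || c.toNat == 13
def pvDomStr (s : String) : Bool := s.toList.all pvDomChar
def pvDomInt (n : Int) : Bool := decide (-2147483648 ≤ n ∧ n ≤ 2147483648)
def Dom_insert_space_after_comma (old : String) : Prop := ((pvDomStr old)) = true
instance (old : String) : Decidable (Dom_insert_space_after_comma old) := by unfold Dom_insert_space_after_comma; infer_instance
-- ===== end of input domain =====

-- B replaces A's per-character loop and concatenation by split-on-comma + ", ".join (simpler decomposition, same O(n) cost).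


-- ===== PORT A =====
-- new = ""; for c in old: if c == "," then new += ", " else new += c; return new, None
def insert_space_after_comma (old : String) : String × Option String :=
  (String.ofList
    (old.toList.foldl
      (fun new c => if c == ',' then new ++ [',', ' '] else new ++ [c]) []),
   none)

-- ===== PORT B =====
-- return ", ".join(old.split(",")), None
def insert_space_after_comma_alt (old : String) : String × Option String :=
  (PySem.Str.join ", " ((PySem.Str.split? old ",").getD []), none)

-- ===== PRECONDITION & SPEC =====
def Spec_insert_space_after_comma (old : String) (out : String × Option String) : Prop := out = insert_space_after_comma_alt old
instance (old : String) (out : String × Option String) : Decidable (Spec_insert_space_after_comma old out) := by unfold Spec_insert_space_after_comma; infer_instance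

-- ===== CLAIM (what is proved, stated in full; the proofs are below) =====
def Claim_equal_insert_space_after_comma : Prop := ∀ (old : String), Dom_insert_space_after_comma old → Spec_insert_space_after_comma old (insert_space_after_comma old)

-- ===== LEMMAS AND PROOFS =====

def pvA : List Char → List Char
  | [] => []
  | c :: rest => (if c == ',' then [',', ' '] else [c]) ++ pvA rest

theorem join_append_singleton (sp : List Char) (xs : List (List Char)) (y : List Char)
    (h : xs ≠ []) :
    PySem.Chars.join sp (xs ++ [y]) = PySem.Chars.join sp xs ++ sp ++ y := by
  induction xs with
  | nil => exact absurd rfl h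
  | cons x xs ih =>
      cases xs with
      | nil => simp [PySem.Chars.join, List.intercalate]
      | cons x' xs' =>
          have := ih (by simp)
          simp only [PySem.Chars.join, List.intercalate] at this ⊢
          simp [List.intersperse] at this ⊢
          simp [this]

theorem go_join : ∀ (fuel : Nat) (l cur : List Char) (acc : List (List Char)),
    l.length ≤ fuel →
    PySem.Chars.join [',', ' '] (PySem.Chars.splitOn.go [','] fuel l cur acc)
      = PySem.Chars.join [',', ' '] (acc.reverse ++ [cur.reverse]) ++ pvA l := by
  intro fuel
  induction fuel with
  | zero =>
      intro l cur acc h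
      have hl : l = [] := by cases l with | nil => rfl | cons a t => simp at h
      subst hl
      rw [PySem.Chars.splitOn.go.eq_def]; simp [pvA]
  | succ fuel ih =>
      intro l cur acc h
      cases l with
      | nil => rw [PySem.Chars.splitOn.go.eq_def]; simp [pvA]
      | cons c rest =>
          rw [PySem.Chars.splitOn.go.eq_def]
          simp only []
          by_cases hc : c = ','
          · subst hc
            have hpre : List.isPrefixOf [','] (',' :: rest) = true := by
              simp [List.isPrefixOf]
            rw [if_pos hpre]
            have := ih rest [] (cur.reverse :: acc) (by simpa using Nat.le_of_succ_le_succ h)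
            have hdrop : List.drop [','].length (',' :: rest) = rest := by simp
            rw [hdrop, this]
            have hjoin : PySem.Chars.join [',', ' '] ((cur.reverse :: acc).reverse ++ [List.reverse ([] : List Char)])
                = PySem.Chars.join [',', ' '] (acc.reverse ++ [cur.reverse]) ++ [',', ' '] := by
              have heq : (cur.reverse :: acc).reverse ++ [List.reverse ([] : List Char)]
                  = (acc.reverse ++ [cur.reverse]) ++ [[]] := by simp
              rw [heq, join_append_singleton _ _ _ (by simp)]
              simp
            rw [hjoin]
            simp [pvA]
          · have hpre : List.isPrefixOf [','] (c :: rest) = false := by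
              simp [List.isPrefixOf]
              exact fun e => hc e.symm
            rw [if_neg (by simp [hpre])]
            have := ih rest (c :: cur) acc (by simpa using Nat.le_of_succ_le_succ h)
            rw [this]
            have hjoin : PySem.Chars.join [',', ' '] (acc.reverse ++ [(c :: cur).reverse])
                = PySem.Chars.join [',', ' '] (acc.reverse ++ [cur.reverse]) ++ [c] := by
              cases hacc : acc.reverse with
              | nil => simp [PySem.Chars.join, List.intercalate]
              | cons a t =>
                  rw [join_append_singleton _ _ _ (by simp), join_append_singleton _ _ _ (by simp)]
                  simp
            rw [hjoin]
            simp [pvA, hc]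


theorem splitOn_join (cs : List Char) :
    PySem.Chars.join [',', ' '] (PySem.Chars.splitOn cs [',']) = pvA cs := by
  unfold PySem.Chars.splitOn
  rw [go_join (cs.length + 1) cs [] [] (Nat.le_succ _)]
  simp [PySem.Chars.join, List.intercalate]

theorem pvA_foldl (l : List Char) : ∀ acc : List Char,
    l.foldl (fun new c => if c == ',' then new ++ [',', ' '] else new ++ [c]) acc
      = acc ++ pvA l := by
  induction l with
  | nil => intro acc; simp [pvA]
  | cons c rest ih =>
      intro acc
      simp only [List.foldl_cons, pvA, ih]
      by_cases h : c = ','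
      · simp [h]
      · simp [h]



-- ===== VERDICT (by name: the statement is the Claim_ definition above) =====
theorem insert_space_after_comma_spec : Claim_equal_insert_space_after_comma := by
  intro old _
  unfold Spec_insert_space_after_comma insert_space_after_comma insert_space_after_comma_alt
  have hsep : (",".toList) = [','] := rfl
  have hsp : (", ".toList) = [',', ' '] := rfl
  simp only [PySem.Str.join, PySem.Str.split?, PySem.Chars.split?, hsep, hsp]
  simp only [List.isEmpty_cons, Bool.false_eq_true, reduceIte, Option.map_some, Option.getD_some, List.map_map,
    Function.comp_def, String.toList_ofList, List.map_id']
  rw [splitOn_join, pvA_foldl old.toList []]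
  simp
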